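-- pv_equiv track=rewrite | github.com/mweaser/leetcode_python | 2259-remove-digit-from-number-to-maximize-result/2259-remove-digit-from-number-to-maximize-result.py | removeDigit
-- ===== SOURCE A (Python) =====
-- def removeDigit(number: str, digit: str) -> str:
--
--     max_num = 0
--     n = list(number)
--
--     for i in range(len(n)):
--         curr = n.copy()
--
--         if n[i] == digit:
--             curr.pop(i)
--             max_num = max(max_num, int("".join(curr)))
--
--     return str(max_num)
-- ===== SOURCE B (Python) =====
-- def removeDigit(number: str, digit: str) -> str:
--     # One greedy pass: break at the first occurrence of digit followed by a larger
--     # character (removing it there is optimal), otherwise keep the last occurrence.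
--     last = None
--     for i in range(len(number)):
--         if number[i] == digit:
--             last = i
--             if i + 1 < len(number) and number[i + 1] > number[i]:
--                 break
--     if last is None:
--         return "0"
--     return str(int(number[:last] + number[last + 1:]))
-- ===== Notes on version B (the rewrite author's own statement) =====
-- stated objective: faster
-- what changed: A rebuilds and re-parses the whole string with int() at every occurrence of digit and takes the max; B does one greedy pass that picks the single optimal removal position (first occurrence followed by a larger character, else the last occurrence) and converts once.
-- outside the precondition, e.g. on removeDigit('5a', 'a'): A returns '5', B returns '5'; on removeDigit('--5', '-'): A returns '0', B returns '-5'; on removeDigit('a5a', 'a'): A raises ValueError, B raises ValueError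
import Mathlib
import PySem

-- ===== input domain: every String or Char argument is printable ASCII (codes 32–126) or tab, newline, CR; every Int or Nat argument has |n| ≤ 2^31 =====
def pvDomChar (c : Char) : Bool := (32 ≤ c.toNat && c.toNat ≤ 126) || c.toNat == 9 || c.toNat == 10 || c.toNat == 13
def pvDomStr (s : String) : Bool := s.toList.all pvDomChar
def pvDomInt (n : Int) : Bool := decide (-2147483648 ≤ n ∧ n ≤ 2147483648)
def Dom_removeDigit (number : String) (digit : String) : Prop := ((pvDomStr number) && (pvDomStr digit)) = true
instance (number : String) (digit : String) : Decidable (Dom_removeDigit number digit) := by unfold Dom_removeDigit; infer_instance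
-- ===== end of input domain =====

-- B replaces A's scan that re-joins and re-parses the string at every removal position
-- with a single greedy pass that picks the one optimal removal position.

-- ===== PORT A =====
-- int("".join(curr)) is hand-ported by pvInt below: it is exact on the nonempty all-digit
-- strings that reach it under Pre_removeDigit (the value of a decimal digit string).
-- (PySem.Int.ofStr?'s parser body is a private definition, so no fact about it on a
-- variable digit string can be stated or proved here.)
def pvDigitsVal (cs : List Char) : Nat := cs.foldl (fun a c => 10 * a + (c.toNat - 48)) 0
def pvInt (cs : List Char) : Int := (pvDigitsVal cs : Int)

def removeDigit (number : String) (digit : String) : String :=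
  let n := number.toList                                -- n = list(number)
  let maxNum : Int := (List.range n.length).foldl (fun m i =>
    -- n[i] == digit : one-char string vs string, compared via toList (String.toList is
    -- injective); i ∈ range(len(n)), so the ' ' default of getD is never used
    if [n.getD i ' '] = digit.toList then
      -- curr = n.copy(); curr.pop(i); max_num = max(max_num, int("".join(curr)))
      max m (pvInt (n.eraseIdx i))
    else m) 0
  PySem.Int.toStr maxNum                                -- str(max_num)

-- ===== PORT B =====
-- i + 1 < len(number) and number[i+1] > number[i], on the suffix after position i;
-- comparison of one-char strings is exactly code-point comparison of the chars
def goodHead (c : Char) : List Char → Bool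
  | next :: _ => decide (c < next)
  | [] => false

-- the loop of Source B: `last` accumulator, break (= return) at the first occurrence of
-- digit that is followed by a larger character
def pickIdx (dt : List Char) : List Char → Nat → Option Nat → Option Nat
  | [], _, last => last
  | c :: rest, i, last =>
    if [c] = dt then
      if goodHead c rest then some i
      else pickIdx dt rest (i + 1) (some i)
    else pickIdx dt rest (i + 1) last

def removeDigit_alt (number : String) (digit : String) : String :=
  let n := number.toList
  match pickIdx digit.toList n 0 none with
  | none => "0"
  | some g =>
      -- str(int(number[:last] + number[last+1:])); int() hand-ported by pvInt as in port A
      PySem.Int.toStr (pvInt (PySem.List.slice n none (some (g : Int)) ++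
                              PySem.List.slice n (some ((g : Int) + 1)) none))

-- ===== PRECONDITION & SPEC =====
-- Pre_ restricts to the task's natural numeric domain: whenever digit occurs in number,
-- number must be an all-ASCII-digit string of length ≥ 2.  Outside it A's int() either
-- raises ValueError (e.g. ("a5a","a"), or ("7","7") where int("") raises) or, on strings
-- int() still happens to parse (signs/spaces), A's value is an accident of int()'s
-- lenience folded through max(0, ...) — e.g. ("--5","-"), where A returns "0".
def Pre_removeDigit (number : String) (digit : String) : Prop :=
  (number.toList.any (fun c => [c] == digit.toList) = true) →
    ((number.toList.all Char.isDigit) = true ∧ 2 ≤ number.toList.length)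
instance (number : String) (digit : String) : Decidable (Pre_removeDigit number digit) := by
  unfold Pre_removeDigit; infer_instance

def pvWitness_removeDigit : String × String := ("1234", "3")

def Spec_removeDigit (number : String) (digit : String) (out : String) : Prop :=
  out = removeDigit_alt number digit
instance (number : String) (digit : String) (out : String) : Decidable (Spec_removeDigit number digit out) := by
  unfold Spec_removeDigit; infer_instance

-- ===== CLAIM (what is proved, stated in full; the proofs are below) =====
def Claim_equal_removeDigit : Prop := ∀ (number : String) (digit : String),
  Dom_removeDigit number digit → Pre_removeDigit number digit →
  Spec_removeDigit number digit (removeDigit number digit)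

-- ===== LEMMAS AND PROOFS =====

-- proof-side abbreviations: position i holds the digit / is a profitable removal point
def pvOcc (n dt : List Char) (i : Nat) : Prop := i < n.length ∧ [n.getD i ' '] = dt
def pvGood (n : List Char) (k : Nat) : Prop := k + 1 < n.length ∧ n.getD k ' ' < n.getD (k + 1) ' '

theorem pv_dv_acc (cs : List Char) : ∀ a : Nat,
    cs.foldl (fun a c => 10 * a + (c.toNat - 48)) a
      = a * 10 ^ cs.length + pvDigitsVal cs := by
  induction cs with
  | nil => intro a; simp [pvDigitsVal]
  | cons c t ih =>
    intro a
    simp only [List.foldl_cons, List.length_cons, pvDigitsVal]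
    rw [ih, ih (10 * 0 + (c.toNat - 48))]
    ring

theorem pv_dv_cons (c : Char) (cs : List Char) :
    pvDigitsVal (c :: cs) = (c.toNat - 48) * 10 ^ cs.length + pvDigitsVal cs := by
  simp only [pvDigitsVal, List.foldl_cons]
  rw [pv_dv_acc]
  simp [pvDigitsVal]

theorem pv_digit_bounds {c : Char} (h : c.isDigit = true) : 48 ≤ c.toNat ∧ c.toNat ≤ 57 := by
  simp [Char.isDigit, decide_eq_true_eq] at h
  exact ⟨h.1, h.2⟩

theorem pv_dv_lt {cs : List Char} (h : ∀ c ∈ cs, c.isDigit = true) :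
    pvDigitsVal cs < 10 ^ cs.length := by
  induction cs with
  | nil => simp [pvDigitsVal]
  | cons c t ih =>
    have hb := pv_digit_bounds (h c (by simp))
    have ht := ih (fun c hc => h c (by simp [hc]))
    rw [pv_dv_cons]
    simp only [List.length_cons, pow_succ]
    have : c.toNat - 48 ≤ 9 := by omega
    nlinarith [pow_pos (by norm_num : (0:Nat) < 10) t.length]

theorem pv_headcmp {a b : Char} {x y : List Char} (hlen : x.length = y.length)
    (hx : ∀ c ∈ x, c.isDigit = true) (ha : a.isDigit = true) (hb : b.isDigit = true)
    (hab : a < b) : pvDigitsVal (a :: x) < pvDigitsVal (b :: y) := by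
  rw [pv_dv_cons, pv_dv_cons, hlen]
  have h1 := pv_dv_lt hx
  have ha' := pv_digit_bounds ha
  have hb' := pv_digit_bounds hb
  have hab' : a.toNat < b.toNat := by
    rw [Char.lt_def] at hab
    exact hab
  rw [hlen] at h1
  have hAB : a.toNat - 48 + 1 ≤ b.toNat - 48 := by omega
  calc (a.toNat - 48) * 10 ^ y.length + pvDigitsVal x
      < (a.toNat - 48) * 10 ^ y.length + 10 ^ y.length := by omega
    _ = (a.toNat - 48 + 1) * 10 ^ y.length := by ring
    _ ≤ (b.toNat - 48) * 10 ^ y.length := Nat.mul_le_mul_right _ hAB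
    _ ≤ (b.toNat - 48) * 10 ^ y.length + pvDigitsVal y := Nat.le_add_right _ _

-- erasing at i versus at j > i: the character right after position i decides
theorem pv_cmp_main : ∀ (n : List Char) (i j : Nat),
    (∀ c ∈ n, c.isDigit = true) → i < j → j < n.length →
    (n.getD (i+1) ' ' < n.getD i ' ' → pvDigitsVal (n.eraseIdx i) < pvDigitsVal (n.eraseIdx j)) ∧
    (n.getD i ' ' < n.getD (i+1) ' ' → pvDigitsVal (n.eraseIdx j) < pvDigitsVal (n.eraseIdx i)) := by
  intro n
  induction n with
  | nil => intro i j _ _ hj; simp at hj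
  | cons c t ih =>
    intro i j hd hij hj
    match i, j with
    | 0, j+1 =>
      simp only [List.eraseIdx_cons_zero, List.eraseIdx_cons_succ]
      have hjt : j < t.length := by simpa using hj
      have ht : t ≠ [] := by intro h; rw [h] at hjt; simp at hjt
      obtain ⟨a, t', rfl⟩ := List.exists_cons_of_ne_nil ht
      have hlen : t'.length = ((a :: t').eraseIdx j).length := by
        rw [List.length_eraseIdx]
        simp only [List.length_cons] at hjt ⊢
        rw [if_pos hjt]
        omega
      have hdt : ∀ x ∈ (a :: t'), x.isDigit = true := fun x hx => hd x (List.mem_cons_of_mem _ hx)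
      have hdt' : ∀ x ∈ t', x.isDigit = true := fun x hx => hdt x (by simp [hx])
      have hde : ∀ x ∈ (a :: t').eraseIdx j, x.isDigit = true :=
        fun x hx => hdt x (List.mem_of_mem_eraseIdx hx)
      constructor
      · intro hlt
        simp only [List.getD_cons_succ, List.getD_cons_zero] at hlt
        exact pv_headcmp hlen hdt' (hdt a (by simp)) (hd c (by simp)) hlt
      · intro hlt
        simp only [List.getD_cons_succ, List.getD_cons_zero] at hlt
        exact pv_headcmp hlen.symm hde (hd c (by simp)) (hdt a (by simp)) hlt
    | i+1, j+1 =>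
      simp only [List.eraseIdx_cons_succ]
      have hjt : j < t.length := by simpa using hj
      have hdt : ∀ x ∈ t, x.isDigit = true := fun x hx => hd x (by simp [hx])
      have hij' : i < j := by omega
      have := ih i j hdt hij' hjt
      have hleni : (t.eraseIdx i).length = (t.eraseIdx j).length := by
        rw [List.length_eraseIdx, List.length_eraseIdx]
        have : i < t.length := by omega
        simp [this, hjt]
      constructor
      · intro hlt
        simp only [List.getD_cons_succ] at hlt
        have h1 := this.1 hlt
        rw [pv_dv_cons, pv_dv_cons, hleni]
        omega
      · intro hlt
        simp only [List.getD_cons_succ] at hlt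
        have h1 := this.2 hlt
        rw [pv_dv_cons, pv_dv_cons, hleni]
        omega

theorem pv_erase_adj : ∀ (n : List Char) (p : Nat), p + 1 < n.length →
    n.getD p ' ' = n.getD (p+1) ' ' → n.eraseIdx p = n.eraseIdx (p+1) := by
  intro n
  induction n with
  | nil => intro p hp; simp at hp
  | cons c t ih =>
    intro p hp he
    match p with
    | 0 =>
      have ht : t ≠ [] := by
        intro h; rw [h] at hp; simp at hp
      obtain ⟨a, t', rfl⟩ := List.exists_cons_of_ne_nil ht
      simp only [List.getD_cons_zero, List.getD_cons_succ] at he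
      simp [he]
    | p+1 =>
      simp only [List.eraseIdx_cons_succ]
      have hp' : p + 1 < t.length := by simpa using hp
      simp only [List.getD_cons_succ] at he
      rw [ih p hp' he]

-- between two occurrences with no profitable removal point in between,
-- the later removal is at least as good
theorem pv_chain_le (n dt : List Char) (hd : ∀ c ∈ n, c.isDigit = true) :
    ∀ (k p q : Nat), pvOcc n dt p → pvOcc n dt q → p ≤ q → q - p ≤ k →
    (∀ m, p ≤ m → m < q → pvOcc n dt m → n.getD (m+1) ' ' ≤ n.getD m ' ') →
    pvDigitsVal (n.eraseIdx p) ≤ pvDigitsVal (n.eraseIdx q) := by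
  intro k
  induction k with
  | zero =>
    intro p q _ _ hpq hk _
    have : p = q := by omega
    subst this; exact le_refl _
  | succ k ih =>
    intro p q hp hq hpq hk hmid
    rcases Nat.eq_or_lt_of_le hpq with heq | hlt
    · subst heq; exact le_refl _
    · have hnext := hmid p (le_refl _) hlt hp
      rcases lt_or_eq_of_le hnext with hlt2 | heq2
      · exact le_of_lt ((pv_cmp_main n p q hd hlt hq.1).1 hlt2)
      · have hp1 : p + 1 ≤ q := hlt
        have hplen : p + 1 < n.length := by
          have := hq.1; omega
        have he : n.eraseIdx p = n.eraseIdx (p+1) := pv_erase_adj n p hplen (by rw [heq2])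
        have hocc1 : pvOcc n dt (p+1) := ⟨hplen, by rw [heq2]; exact hp.2⟩
        rw [he]
        exact ih (p+1) q hocc1 hq hp1 (by omega)
          (fun m hm1 hm2 hm3 => hmid m (by omega) hm2 hm3)

theorem pv_getD_drop (n : List Char) (i : Nat) (d : Char) :
    (n.drop i).getD 0 d = n.getD i d := by
  rw [List.getD_eq_getElem?_getD, List.getD_eq_getElem?_getD, List.getElem?_drop, Nat.add_zero]

-- what B's loop computes: the first profitable occurrence, else the last occurrence
theorem pv_pick_spec (dt n : List Char) : ∀ (l : List Char) (i0 : Nat) (last : Option Nat),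
    l = n.drop i0 →
    (∀ k, k < i0 → pvOcc n dt k → ¬ pvGood n k) →
    (match last with
     | none => ∀ k, k < i0 → ¬ pvOcc n dt k
     | some m => pvOcc n dt m ∧ m < i0 ∧ ∀ k, k < i0 → pvOcc n dt k → k ≤ m) →
    (match pickIdx dt l i0 last with
     | none => ∀ k, ¬ pvOcc n dt k
     | some g => pvOcc n dt g ∧
         ((pvGood n g ∧ ∀ k, k < g → pvOcc n dt k → ¬ pvGood n k) ∨
          ((∀ k, pvOcc n dt k → ¬ pvGood n k) ∧ ∀ k, pvOcc n dt k → k ≤ g))) := by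
  intro l
  induction l with
  | nil =>
    intro i0 last hdrop hng hinv
    have hlen : n.length ≤ i0 := by
      by_contra h
      push_neg at h
      have := List.drop_eq_nil_iff.mp hdrop.symm
      omega
    simp only [pickIdx]
    match last, hinv with
    | none, hinv =>
      exact fun k hk => hinv k (lt_of_lt_of_le hk.1 hlen) hk
    | some m, ⟨hm, _, hall⟩ =>
      refine ⟨hm, Or.inr ⟨fun k hk => hng k (lt_of_lt_of_le hk.1 hlen) hk,
        fun k hk => hall k (lt_of_lt_of_le hk.1 hlen) hk⟩⟩
  | cons c rest ih =>
    intro i0 last hdrop hng hinv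
    have hi0 : i0 < n.length := by
      by_contra h
      push_neg at h
      have : n.drop i0 = [] := List.drop_eq_nil_iff.mpr h
      rw [this] at hdrop; exact (List.cons_ne_nil _ _) hdrop
    have hc : n.getD i0 ' ' = c := by
      have h0 : (n.drop i0).getD 0 ' ' = c := by rw [← hdrop]; rfl
      rwa [pv_getD_drop] at h0
    have hrest : rest = n.drop (i0 + 1) := by
      have := congrArg List.tail hdrop
      simpa [List.tail_drop] using this
    simp only [pickIdx]
    by_cases hocc : [c] = dt
    · rw [if_pos hocc]
      have hocc0 : pvOcc n dt i0 := ⟨hi0, by rw [hc]; exact hocc⟩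
      have hgooddec : (goodHead c rest = true) ↔ pvGood n i0 := by
        cases rest with
        | nil =>
          simp only [goodHead, Bool.false_eq_true, false_iff]
          intro h
          have hlen2 : (n.drop (i0+1)).length = n.length - (i0+1) := List.length_drop ..
          rw [← hrest] at hlen2
          simp at hlen2
          exact absurd h.1 (by omega)
        | cons next r =>
          have h1 : i0 + 1 < n.length := by
            have hlen2 : (n.drop (i0+1)).length = n.length - (i0+1) := List.length_drop ..
            rw [← hrest] at hlen2
            simp at hlen2
            omega
          have h2 : n.getD (i0+1) ' ' = next := by
            have h0 : (n.drop (i0+1)).getD 0 ' ' = next := by rw [← hrest]; rfl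
            rwa [pv_getD_drop] at h0
          simp only [goodHead, decide_eq_true_eq]
          constructor
          · intro h; exact ⟨h1, by rw [hc, h2]; exact h⟩
          · intro h; rw [← hc, ← h2]; exact h.2
      by_cases hgood : goodHead c rest = true
      · rw [if_pos hgood]
        exact ⟨hocc0, Or.inl ⟨hgooddec.mp hgood, fun k hk => hng k hk⟩⟩
      · rw [if_neg hgood]
        have hnotgood : ¬ pvGood n i0 := fun h => hgood (hgooddec.mpr h)
        refine ih (i0 + 1) (some i0) hrest ?_ ?_
        · intro k hk hkocc
          rcases Nat.lt_succ_iff_lt_or_eq.mp hk with h | h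
          · exact hng k h hkocc
          · subst h; exact hnotgood
        · exact ⟨hocc0, Nat.lt_succ_self _, fun k hk _ => Nat.lt_succ_iff.mp hk⟩
    · rw [if_neg hocc]
      have hnocc : ¬ pvOcc n dt i0 := fun h => hocc (by rw [← hc]; exact h.2)
      refine ih (i0 + 1) last hrest ?_ ?_
      · intro k hk hkocc
        rcases Nat.lt_succ_iff_lt_or_eq.mp hk with h | h
        · exact hng k h hkocc
        · subst h; exact absurd hkocc hnocc
      · match last, hinv with
        | none, hinv =>
          intro k hk
          rcases Nat.lt_succ_iff_lt_or_eq.mp hk with h | h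
          · exact hinv k h
          · subst h; exact hnocc
        | some m, ⟨hm, hmi, hall⟩ =>
          refine ⟨hm, by omega, fun k hk hkocc => ?_⟩
          rcases Nat.lt_succ_iff_lt_or_eq.mp hk with h | h
          · exact hall k h hkocc
          · subst h; exact absurd hkocc hnocc

theorem pv_pick_none {n dt : List Char} (h : pickIdx dt n 0 none = none) :
    ∀ k, ¬ pvOcc n dt k := by
  have := pv_pick_spec dt n n 0 none (by simp) (by omega) (by intro k hk; omega)
  rw [h] at this
  exact this

-- B's pick dominates every removal position
theorem pv_dominance {n dt : List Char} {g : Nat} (hd : ∀ c ∈ n, c.isDigit = true)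
    (h : pickIdx dt n 0 none = some g) :
    pvOcc n dt g ∧ ∀ i, pvOcc n dt i → pvDigitsVal (n.eraseIdx i) ≤ pvDigitsVal (n.eraseIdx g) := by
  have hs := pv_pick_spec dt n n 0 none (by simp) (by omega) (by intro k hk; omega)
  rw [h] at hs
  obtain ⟨hg, hcase⟩ := hs
  refine ⟨hg, fun i hi => ?_⟩
  rcases hcase with ⟨hgood, hfirst⟩ | ⟨hnone, hlast⟩
  · rcases lt_trichotomy i g with hlt | heq | hgt
    · refine pv_chain_le n dt hd (g - i) i g hi hg (le_of_lt hlt) (le_refl _) ?_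
      intro m hm1 hm2 hm3
      have hng := hfirst m hm2 hm3
      have hm1len : m + 1 < n.length := by
        have := hg.1; omega
      by_contra hcon
      push_neg at hcon
      exact hng ⟨hm1len, hcon⟩
    · subst heq; exact le_refl _
    · exact le_of_lt ((pv_cmp_main n g i hd hgt hi.1).2 hgood.2)
  · have hig : i ≤ g := hlast i hi
    refine pv_chain_le n dt hd (g - i) i g hi hg hig (le_refl _) ?_
    intro m hm1 hm2 hm3
    have hng := hnone m hm3
    have hm1len : m + 1 < n.length := by
      have := hg.1; omega
    by_contra hcon
    push_neg at hcon
    exact hng ⟨hm1len, hcon⟩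

-- A's fold over all positions
theorem pv_fold_le (n dt : List Char) (V : Int)
    (hV : ∀ i, pvOcc n dt i → pvInt (n.eraseIdx i) ≤ V) :
    ∀ (l : List Nat) (m : Int), (∀ i ∈ l, i < n.length) → m ≤ V →
    l.foldl (fun m i => if [n.getD i ' '] = dt then max m (pvInt (n.eraseIdx i)) else m) m ≤ V := by
  intro l
  induction l with
  | nil => intro m _ hm; simpa using hm
  | cons a l ih =>
    intro m hmem hm
    simp only [List.foldl_cons]
    refine ih _ (fun i hi => hmem i (by simp [hi])) ?_
    split_ifs with hocc
    · exact max_le hm (hV a ⟨hmem a (by simp), hocc⟩)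
    · exact hm

theorem pv_fold_ge (n dt : List Char) (g : Nat) (hocc : [n.getD g ' '] = dt) :
    ∀ (l : List Nat) (m : Int), g ∈ l →
    pvInt (n.eraseIdx g) ≤
    l.foldl (fun m i => if [n.getD i ' '] = dt then max m (pvInt (n.eraseIdx i)) else m) m := by
  intro l
  induction l with
  | nil => intro m h; simp at h
  | cons a l ih =>
    intro m hmem
    simp only [List.foldl_cons]
    rcases List.mem_cons.mp hmem with heq | hmem'
    · subst heq
      rw [if_pos hocc]
      calc pvInt (n.eraseIdx g) ≤ max m (pvInt (n.eraseIdx g)) := le_max_right _ _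
        _ ≤ _ := by
            have grow : ∀ (l : List Nat) (m : Int), m ≤
                l.foldl (fun m i => if [n.getD i ' '] = dt then max m (pvInt (n.eraseIdx i)) else m) m := by
              intro l
              induction l with
              | nil => intro m; simp
              | cons b l ihb =>
                intro m
                simp only [List.foldl_cons]
                calc m ≤ (if [n.getD b ' '] = dt then max m (pvInt (n.eraseIdx b)) else m) := by
                      split_ifs
                      · exact le_max_left _ _
                      · exact le_refl _
                  _ ≤ _ := by
                      set m1 := (if [n.getD b ' '] = dt then max m (pvInt (n.eraseIdx b)) else m)
                      exact ihb m1
            exact grow l _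
    · exact ih _ hmem'

theorem pv_fold_noocc (n dt : List Char) (h : ∀ k, ¬ pvOcc n dt k) :
    ∀ (l : List Nat) (m : Int), (∀ i ∈ l, i < n.length) →
    l.foldl (fun m i => if [n.getD i ' '] = dt then max m (pvInt (n.eraseIdx i)) else m) m = m := by
  intro l
  induction l with
  | nil => intro m _; simp
  | cons a l ih =>
    intro m hmem
    simp only [List.foldl_cons]
    rw [if_neg (fun hc => h a ⟨hmem a (by simp), hc⟩)]
    exact ih m (fun i hi => hmem i (by simp [hi]))

theorem pv_erase_slice (n : List Char) (g : Nat) :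
    PySem.List.slice n none (some (g : Int)) ++ PySem.List.slice n (some ((g : Int) + 1)) none
      = n.eraseIdx g := by
  rw [PySem.List.slice_to n (by positivity : (0:Int) ≤ (g:Int))]
  have h1 : ((g : Int) + 1) = ((g + 1 : Nat) : Int) := by push_cast; ring
  rw [h1, PySem.List.slice_from n (by positivity : (0:Int) ≤ ((g+1 : Nat):Int))]
  simp only [Int.toNat_natCast]
  rw [List.eraseIdx_eq_take_drop_succ]

-- ===== VERDICT (by name: the statement is the Claim_ definition above) =====
theorem removeDigit_spec : Claim_equal_removeDigit := by
  intro number digit _dom hpre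
  unfold Pre_removeDigit at hpre
  unfold Spec_removeDigit removeDigit removeDigit_alt
  simp only []
  cases hpick : pickIdx digit.toList number.toList 0 none with
  | none =>
    have hno := pv_pick_none hpick
    rw [pv_fold_noocc number.toList digit.toList hno (List.range number.toList.length) 0
      (by intro i hi; simpa using hi)]
    rfl
  | some g =>
    have hs := pv_pick_spec digit.toList number.toList number.toList 0 none (by simp)
      (by intro k hk; omega) (by intro k hk; omega)
    rw [hpick] at hs
    have hg := hs.1
    have hex : number.toList.any (fun c => [c] == digit.toList) = true :=
      List.any_eq_true.mpr ⟨number.toList.getD g ' ', by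
        rw [List.getD_eq_getElem _ _ hg.1]
        exact List.getElem_mem hg.1, beq_iff_eq.mpr hg.2⟩
    obtain ⟨hall, _⟩ := hpre hex
    have hd : ∀ c ∈ number.toList, c.isDigit = true := List.all_eq_true.mp hall
    obtain ⟨hgocc, hdomin⟩ := pv_dominance hd hpick
    have hle := pv_fold_le number.toList digit.toList (pvInt (number.toList.eraseIdx g))
      (fun i hi => by exact_mod_cast Nat.cast_le.mpr (hdomin i hi))
      (List.range number.toList.length) 0
      (by intro i hi; simpa using hi) (Int.natCast_nonneg _)
    have hge := pv_fold_ge number.toList digit.toList g hg.2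
      (List.range number.toList.length) 0 (List.mem_range.mpr hg.1)
    rw [le_antisymm hle hge, ← pv_erase_slice number.toList g]
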